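-- pv_equiv track=rewrite | github.com/ZacharyACoon/AdventOfCode | 2020/aoc2020/day10/solution.py | validate_configuration
-- ===== SOURCE A (Python) =====
-- def validate_configuration(adapters):
--     last = None
--     for adapter in adapters:
--         if last is None:
--             last = adapter
--         else:
--             if not last < adapter <= last + 3:
--                 return False
--             else:
--                 last = adapter
--     return True
-- ===== SOURCE B (Python) =====
-- def validate_configuration(adapters):
--     diffs = [y - x for x, y in zip(adapters, adapters[1:])]
--     return not diffs or (min(diffs) >= 1 and max(diffs) <= 3)
-- ===== Notes on version B (the rewrite author's own statement) =====
-- stated objective: alternative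
-- what changed: Instead of scanning adjacent pairs with a comparison chain and an early return, B first materialises the list of numeric gaps y-x between neighbours and then range-checks the whole sequence at once via min(diffs) >= 1 and max(diffs) <= 3.
import Mathlib
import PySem

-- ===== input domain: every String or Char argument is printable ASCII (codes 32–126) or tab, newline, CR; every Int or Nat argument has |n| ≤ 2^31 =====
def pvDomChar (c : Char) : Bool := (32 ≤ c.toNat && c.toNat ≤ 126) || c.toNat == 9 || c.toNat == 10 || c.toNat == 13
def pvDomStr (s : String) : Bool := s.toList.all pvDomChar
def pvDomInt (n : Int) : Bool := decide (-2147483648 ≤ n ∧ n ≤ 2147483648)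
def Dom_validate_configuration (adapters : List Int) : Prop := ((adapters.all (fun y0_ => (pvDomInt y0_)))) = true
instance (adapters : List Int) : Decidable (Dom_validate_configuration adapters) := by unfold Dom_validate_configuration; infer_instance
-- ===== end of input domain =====

-- B replaces A's pairwise comparison chain with early return by building the list of
-- numeric gaps between neighbours and range-checking it at once via min/max (alternative).

-- ===== PORT A =====
-- A's loop over adapters carrying `last : Option Int`; the early `return False` is the `false` branch.
def validate_configuration_loop (last : Option Int) : List Int → Bool
  | [] => true
  | adapter :: rest =>
    match last with
    | none => validate_configuration_loop (some adapter) rest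
    | some l =>
      if ¬ (l < adapter ∧ adapter ≤ l + 3) then false
      else validate_configuration_loop (some adapter) rest

def validate_configuration (adapters : List Int) : Bool :=
  validate_configuration_loop none adapters

-- ===== PORT B =====
-- diffs = [y - x for x, y in zip(adapters, adapters[1:])]
-- return not diffs or (min(diffs) >= 1 and max(diffs) <= 3)
def validate_configuration_alt (adapters : List Int) : Bool :=
  let diffs := (adapters.zip (adapters.drop 1)).map (fun p => p.2 - p.1)
  diffs.isEmpty ||
    (match PySem.List.min? diffs (fun x => x), PySem.List.max? diffs (fun x => x) with
     | some m, some M => decide (1 ≤ m) && decide (M ≤ 3)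
     | _, _ => false)

-- ===== PRECONDITION & SPEC =====
def Spec_validate_configuration (adapters : List Int) (out : Bool) : Prop := out = validate_configuration_alt adapters
instance (adapters : List Int) (out : Bool) : Decidable (Spec_validate_configuration adapters out) := by unfold Spec_validate_configuration; infer_instance

-- ===== CLAIM (what is proved, stated in full; the proofs are below) =====
def Claim_equal_validate_configuration : Prop := ∀ (adapters : List Int), Dom_validate_configuration adapters → Spec_validate_configuration adapters (validate_configuration adapters)

-- ===== LEMMAS AND PROOFS =====
-- A's loop from a known `last` = the pairwise check over consecutive pairs.
theorem validate_configuration_loop_some (l : Int) (xs : List Int) :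
    validate_configuration_loop (some l) xs
      = ((l :: xs).zip xs).all (fun p => decide (p.1 < p.2 ∧ p.2 ≤ p.1 + 3)) := by
  induction xs generalizing l with
  | nil => simp [validate_configuration_loop]
  | cons a rest ih =>
    simp only [validate_configuration_loop, List.zip_cons_cons, List.all_cons]
    by_cases h : l < a ∧ a ≤ l + 3
    · simp [h, ih a]
    · simp [h]

-- a lower bound on a running foldl min
theorem le_foldl_min (c x : Int) (t : List Int) :
    (c ≤ t.foldl min x) ↔ (c ≤ x ∧ ∀ y ∈ t, c ≤ y) := by
  induction t generalizing x with
  | nil => simp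
  | cons b t ih =>
    simp only [List.foldl_cons, ih, le_min_iff, List.mem_cons]
    constructor
    · rintro ⟨⟨h1, h2⟩, h3⟩
      exact ⟨h1, fun y hy => hy.elim (fun e => e ▸ h2) (h3 y)⟩
    · rintro ⟨h1, h2⟩
      exact ⟨⟨h1, h2 b (Or.inl rfl)⟩, fun y hy => h2 y (Or.inr hy)⟩

-- an upper bound on a running foldl max
theorem foldl_max_le (c x : Int) (t : List Int) :
    (t.foldl max x ≤ c) ↔ (x ≤ c ∧ ∀ y ∈ t, y ≤ c) := by
  induction t generalizing x with
  | nil => simp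
  | cons b t ih =>
    simp only [List.foldl_cons, ih, max_le_iff, List.mem_cons]
    constructor
    · rintro ⟨⟨h1, h2⟩, h3⟩
      exact ⟨h1, fun y hy => hy.elim (fun e => e ▸ h2) (h3 y)⟩
    · rintro ⟨h1, h2⟩
      exact ⟨⟨h1, h2 b (Or.inl rfl)⟩, fun y hy => h2 y (Or.inr hy)⟩

-- "every gap is in [1,3]" = "min ≥ 1 and max ≤ 3", on a nonempty list
theorem all_range_eq_minmax (d : Int) (t : List Int) :
    ((d :: t).all (fun x => decide (1 ≤ x ∧ x ≤ 3)))
      = (decide (1 ≤ t.foldl min d) && decide (t.foldl max d ≤ 3)) := by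
  rw [Bool.eq_iff_iff]
  simp only [List.all_eq_true, Bool.and_eq_true, decide_eq_true_eq,
    le_foldl_min, foldl_max_le, List.mem_cons]
  constructor
  · intro h
    exact ⟨⟨(h d (Or.inl rfl)).1, fun y hy => (h y (Or.inr hy)).1⟩,
           ⟨(h d (Or.inl rfl)).2, fun y hy => (h y (Or.inr hy)).2⟩⟩
  · rintro ⟨⟨h1, h2⟩, h3, h4⟩ y hy
    rcases hy with e | hy
    · exact e ▸ ⟨h1, h3⟩
    · exact ⟨h2 y hy, h4 y hy⟩

-- pairwise comparison-chain check over pairs = range check over the mapped gaps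
theorem all_pairs_eq_all_diffs (ps : List (Int × Int)) :
    ps.all (fun p => decide (p.1 < p.2 ∧ p.2 ≤ p.1 + 3))
      = (ps.map (fun p => p.2 - p.1)).all (fun x => decide (1 ≤ x ∧ x ≤ 3)) := by
  rw [Bool.eq_iff_iff]
  simp only [List.all_map, List.all_eq_true, Function.comp, decide_eq_true_eq]
  constructor <;> (intro h p hp; have := h p hp; omega)

-- ===== VERDICT (by name: the statement is the Claim_ definition above) =====
theorem validate_configuration_spec : Claim_equal_validate_configuration := by
  intro adapters _
  unfold Spec_validate_configuration validate_configuration validate_configuration_alt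
  cases adapters with
  | nil => simp [validate_configuration_loop]
  | cons a rest =>
    cases rest with
    | nil => simp [validate_configuration_loop]
    | cons b t =>
      have h0 : validate_configuration_loop none (a :: b :: t)
          = validate_configuration_loop (some a) (b :: t) := rfl
      rw [h0, validate_configuration_loop_some, all_pairs_eq_all_diffs]
      simp only [List.drop_one, List.tail_cons, List.zip_cons_cons, List.map_cons,
        List.isEmpty_cons, PySem.List.min?_id_cons, PySem.List.max?_id_cons]
      rw [all_range_eq_minmax]
      simp
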